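-- pv_equiv track=rewrite | github.com/lifting-bits/mcsema | tools/mcsema_disass/ida/collect_variable.py | _get_flags_from_bits
-- ===== SOURCE A (Python) =====
-- def _get_flags_from_bits(flag):
--   '''
--   Translates the flag field in structures (and elsewhere?) into a human readable
--   string that is compatible with pasting into IDA or something.
--   Returns an empty string if supplied with -1.
--   '''
--   if -1 == flag:
--     return ""
--
--   cls = {
--     'MASK':1536,
--     1536:'FF_CODE',
--     1024:'FF_DATA',
--     512:'FF_TAIL',
--     0:'FF_UNK',
--   }
--
--   comm = {
--     'MASK':1046528,
--     2048:'FF_COMM',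
--     4096:'FF_REF',
--     8192:'FF_LINE',
--     16384:'FF_NAME',
--     32768:'FF_LABL',
--     65536:'FF_FLOW',
--     524288:'FF_VAR',
--     49152:'FF_ANYNAME',
--   }
--
--   _0type = {
--     'MASK':15728640,
--     1048576:'FF_0NUMH',
--     2097152:'FF_0NUMD',
--     3145728:'FF_0CHAR',
--     4194304:'FF_0SEG',
--     5242880:'FF_0OFF',
--     6291456:'FF_0NUMB',
--     7340032:'FF_0NUMO',
--     8388608:'FF_0ENUM',
--     9437184:'FF_0FOP',
--     10485760:'FF_0STRO',
--     11534336:'FF_0STK',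
--   }
--   _1type = {
--     'MASK':251658240,
--     16777216:'FF_1NUMH',
--     33554432:'FF_1NUMD',
--     50331648:'FF_1CHAR',
--     67108864:'FF_1SEG',
--     83886080:'FF_1OFF',
--     100663296:'FF_1NUMB',
--     117440512:'FF_1NUMO',
--     134217728:'FF_1ENUM',
--     150994944:'FF_1FOP',
--     167772160:'FF_1STRO',
--     184549376:'FF_1STK',
--   }
--   datatype = {
--     'MASK':4026531840,
--     0:'FF_BYTE',
--     268435456:'FF_WORD',
--     536870912:'FF_DWRD',
--     805306368:'FF_QWRD',
--     1073741824:'FF_TBYT',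
--     1342177280:'FF_ASCI',
--     1610612736:'FF_STRU',
--     1879048192:'FF_OWRD',
--     2147483648:'FF_FLOAT',
--     2415919104:'FF_DOUBLE',
--     2684354560:'FF_PACKREAL',
--     2952790016:'FF_ALIGN',
--   }
--
--   flags = set()
--   flags.add(cls[cls['MASK']&flag])
--
--   for category in [comm, _0type, _1type, datatype]:
--     #the ida docs define, for example, a FF_0VOID = 0 constant in with the rest
--     #  of the 0type constants, but I _think_ that just means
--     #  the field is unused, rather than being specific data
--     val = category.get(category['MASK']&flag, None)
--     if val:
--       flags.add(val)
--   return flags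
-- ===== SOURCE B (Python) =====
-- # Flat table re-implementation: one (name, value, mask) triple per named IDA
-- # flag constant; a single scan adds every name whose masked field matches.
-- _FLAG_TRIPLES = [
--     # cls (mask 1536)
--     ("FF_CODE", 1536, 1536),
--     ("FF_DATA", 1024, 1536),
--     ("FF_TAIL", 512, 1536),
--     ("FF_UNK", 0, 1536),
--     # comm (mask 1046528)
--     ("FF_COMM", 2048, 1046528),
--     ("FF_REF", 4096, 1046528),
--     ("FF_LINE", 8192, 1046528),
--     ("FF_NAME", 16384, 1046528),
--     ("FF_LABL", 32768, 1046528),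
--     ("FF_FLOW", 65536, 1046528),
--     ("FF_VAR", 524288, 1046528),
--     ("FF_ANYNAME", 49152, 1046528),
--     # 0type (mask 15728640)
--     ("FF_0NUMH", 1048576, 15728640),
--     ("FF_0NUMD", 2097152, 15728640),
--     ("FF_0CHAR", 3145728, 15728640),
--     ("FF_0SEG", 4194304, 15728640),
--     ("FF_0OFF", 5242880, 15728640),
--     ("FF_0NUMB", 6291456, 15728640),
--     ("FF_0NUMO", 7340032, 15728640),
--     ("FF_0ENUM", 8388608, 15728640),
--     ("FF_0FOP", 9437184, 15728640),
--     ("FF_0STRO", 10485760, 15728640),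
--     ("FF_0STK", 11534336, 15728640),
--     # 1type (mask 251658240)
--     ("FF_1NUMH", 16777216, 251658240),
--     ("FF_1NUMD", 33554432, 251658240),
--     ("FF_1CHAR", 50331648, 251658240),
--     ("FF_1SEG", 67108864, 251658240),
--     ("FF_1OFF", 83886080, 251658240),
--     ("FF_1NUMB", 100663296, 251658240),
--     ("FF_1NUMO", 117440512, 251658240),
--     ("FF_1ENUM", 134217728, 251658240),
--     ("FF_1FOP", 150994944, 251658240),
--     ("FF_1STRO", 167772160, 251658240),
--     ("FF_1STK", 184549376, 251658240),
--     # datatype (mask 4026531840)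
--     ("FF_BYTE", 0, 4026531840),
--     ("FF_WORD", 268435456, 4026531840),
--     ("FF_DWRD", 536870912, 4026531840),
--     ("FF_QWRD", 805306368, 4026531840),
--     ("FF_TBYT", 1073741824, 4026531840),
--     ("FF_ASCI", 1342177280, 4026531840),
--     ("FF_STRU", 1610612736, 4026531840),
--     ("FF_OWRD", 1879048192, 4026531840),
--     ("FF_FLOAT", 2147483648, 4026531840),
--     ("FF_DOUBLE", 2415919104, 4026531840),
--     ("FF_PACKREAL", 2684354560, 4026531840),
--     ("FF_ALIGN", 2952790016, 4026531840),
-- ]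
--
--
-- def _get_flags_from_bits(flag):
--   '''
--   Translates the flag field into the set of matching flag-constant names.
--   Returns an empty string if supplied with -1.
--   '''
--   if -1 == flag:
--     return ""
--   return {name for (name, value, mask) in _FLAG_TRIPLES if (flag & mask) == value}
-- ===== Notes on version B (the rewrite author's own statement) =====
-- stated objective: simpler
-- what changed: A masks the flag six times and looks each masked field up in a per-category dict (with a special-cased direct index for the cls field); B flattens all named constants into one (name, value, mask) triple table and builds the set in a single comprehension scan that keeps every name whose masked field equals its value.
-- outside the precondition, e.g. on _get_flags_from_bits(-1): A returns '', B returns ''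
import Mathlib
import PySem

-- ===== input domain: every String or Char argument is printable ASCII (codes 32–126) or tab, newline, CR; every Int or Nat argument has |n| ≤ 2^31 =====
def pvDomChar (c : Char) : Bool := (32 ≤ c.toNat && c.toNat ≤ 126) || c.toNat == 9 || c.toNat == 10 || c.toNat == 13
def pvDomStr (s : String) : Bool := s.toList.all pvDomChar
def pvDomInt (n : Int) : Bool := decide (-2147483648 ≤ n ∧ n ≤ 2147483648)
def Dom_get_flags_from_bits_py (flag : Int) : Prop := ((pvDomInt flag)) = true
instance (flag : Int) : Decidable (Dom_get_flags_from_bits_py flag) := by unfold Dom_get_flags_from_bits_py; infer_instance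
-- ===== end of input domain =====

-- B replaces A's six per-category dict lookups by one scan over a flat (name, value, mask) table
-- (objective: simpler). The 'flag == -1' branch of the Python returns the string "", not a set,
-- and is excluded by Pre_ (not representable as List String).

-- ===== PORT A =====
def pvDictCls : PySem.Dict Int String := PySem.Dict.mk [(1536, "FF_CODE"), (1024, "FF_DATA"), (512, "FF_TAIL"), (0, "FF_UNK")]
def pvDictComm : PySem.Dict Int String := PySem.Dict.mk [(2048, "FF_COMM"), (4096, "FF_REF"), (8192, "FF_LINE"), (16384, "FF_NAME"), (32768, "FF_LABL"), (65536, "FF_FLOW"), (524288, "FF_VAR"), (49152, "FF_ANYNAME")]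
def pvDictT0 : PySem.Dict Int String := PySem.Dict.mk [(1048576, "FF_0NUMH"), (2097152, "FF_0NUMD"), (3145728, "FF_0CHAR"), (4194304, "FF_0SEG"), (5242880, "FF_0OFF"), (6291456, "FF_0NUMB"), (7340032, "FF_0NUMO"), (8388608, "FF_0ENUM"), (9437184, "FF_0FOP"), (10485760, "FF_0STRO"), (11534336, "FF_0STK")]
def pvDictT1 : PySem.Dict Int String := PySem.Dict.mk [(16777216, "FF_1NUMH"), (33554432, "FF_1NUMD"), (50331648, "FF_1CHAR"), (67108864, "FF_1SEG"), (83886080, "FF_1OFF"), (100663296, "FF_1NUMB"), (117440512, "FF_1NUMO"), (134217728, "FF_1ENUM"), (150994944, "FF_1FOP"), (167772160, "FF_1STRO"), (184549376, "FF_1STK")]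
def pvDictDt : PySem.Dict Int String := PySem.Dict.mk [(0, "FF_BYTE"), (268435456, "FF_WORD"), (536870912, "FF_DWRD"), (805306368, "FF_QWRD"), (1073741824, "FF_TBYT"), (1342177280, "FF_ASCI"), (1610612736, "FF_STRU"), (1879048192, "FF_OWRD"), (2147483648, "FF_FLOAT"), (2415919104, "FF_DOUBLE"), (2684354560, "FF_PACKREAL"), (2952790016, "FF_ALIGN")]

-- flags.add(cls[cls['MASK']&flag]); the none arm is Python's KeyError, unreachable
-- since 1536&flag is always one of the four keys
def pvAddIndexed (flags : PySem.Set String) : Option String → PySem.Set String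
  | some v => PySem.Set.add flags v
  | none => flags

-- body of A's for-loop: val = category.get(category['MASK']&flag, None); if val: flags.add(val)
def pvCatStep (flag : Int) (flags : PySem.Set String) : Int × PySem.Dict Int String → PySem.Set String
  | (m, d) =>
    match PySem.Dict.get? d (PySem.Int.band m flag) with
    | some v => if v == "" then flags else PySem.Set.add flags v   -- `if val:` — nonempty-string truthiness
    | none => flags

def get_flags_from_bits_py (flag : Int) : List String :=
  List.foldl (pvCatStep flag)
    (pvAddIndexed PySem.Set.empty (PySem.Dict.get? pvDictCls (PySem.Int.band 1536 flag)))
    [(1046528, pvDictComm), (15728640, pvDictT0), (251658240, pvDictT1), (4026531840, pvDictDt)]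

-- ===== PORT B =====
def pvFlagTriples : List (String × Int × Int) := [
  ("FF_CODE", (1536 : Int), (1536 : Int)),
  ("FF_DATA", (1024 : Int), (1536 : Int)),
  ("FF_TAIL", (512 : Int), (1536 : Int)),
  ("FF_UNK", (0 : Int), (1536 : Int)),
  ("FF_COMM", (2048 : Int), (1046528 : Int)),
  ("FF_REF", (4096 : Int), (1046528 : Int)),
  ("FF_LINE", (8192 : Int), (1046528 : Int)),
  ("FF_NAME", (16384 : Int), (1046528 : Int)),
  ("FF_LABL", (32768 : Int), (1046528 : Int)),
  ("FF_FLOW", (65536 : Int), (1046528 : Int)),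
  ("FF_VAR", (524288 : Int), (1046528 : Int)),
  ("FF_ANYNAME", (49152 : Int), (1046528 : Int)),
  ("FF_0NUMH", (1048576 : Int), (15728640 : Int)),
  ("FF_0NUMD", (2097152 : Int), (15728640 : Int)),
  ("FF_0CHAR", (3145728 : Int), (15728640 : Int)),
  ("FF_0SEG", (4194304 : Int), (15728640 : Int)),
  ("FF_0OFF", (5242880 : Int), (15728640 : Int)),
  ("FF_0NUMB", (6291456 : Int), (15728640 : Int)),
  ("FF_0NUMO", (7340032 : Int), (15728640 : Int)),
  ("FF_0ENUM", (8388608 : Int), (15728640 : Int)),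
  ("FF_0FOP", (9437184 : Int), (15728640 : Int)),
  ("FF_0STRO", (10485760 : Int), (15728640 : Int)),
  ("FF_0STK", (11534336 : Int), (15728640 : Int)),
  ("FF_1NUMH", (16777216 : Int), (251658240 : Int)),
  ("FF_1NUMD", (33554432 : Int), (251658240 : Int)),
  ("FF_1CHAR", (50331648 : Int), (251658240 : Int)),
  ("FF_1SEG", (67108864 : Int), (251658240 : Int)),
  ("FF_1OFF", (83886080 : Int), (251658240 : Int)),
  ("FF_1NUMB", (100663296 : Int), (251658240 : Int)),
  ("FF_1NUMO", (117440512 : Int), (251658240 : Int)),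
  ("FF_1ENUM", (134217728 : Int), (251658240 : Int)),
  ("FF_1FOP", (150994944 : Int), (251658240 : Int)),
  ("FF_1STRO", (167772160 : Int), (251658240 : Int)),
  ("FF_1STK", (184549376 : Int), (251658240 : Int)),
  ("FF_BYTE", (0 : Int), (4026531840 : Int)),
  ("FF_WORD", (268435456 : Int), (4026531840 : Int)),
  ("FF_DWRD", (536870912 : Int), (4026531840 : Int)),
  ("FF_QWRD", (805306368 : Int), (4026531840 : Int)),
  ("FF_TBYT", (1073741824 : Int), (4026531840 : Int)),
  ("FF_ASCI", (1342177280 : Int), (4026531840 : Int)),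
  ("FF_STRU", (1610612736 : Int), (4026531840 : Int)),
  ("FF_OWRD", (1879048192 : Int), (4026531840 : Int)),
  ("FF_FLOAT", (2147483648 : Int), (4026531840 : Int)),
  ("FF_DOUBLE", (2415919104 : Int), (4026531840 : Int)),
  ("FF_PACKREAL", (2684354560 : Int), (4026531840 : Int)),
  ("FF_ALIGN", (2952790016 : Int), (4026531840 : Int))]

def get_flags_from_bits_py_alt (flag : Int) : List String :=
  List.foldl
    (fun acc t => if PySem.Int.band flag t.2.2 = t.2.1 then PySem.Set.add acc t.1 else acc)
    PySem.Set.empty pvFlagTriples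

-- ===== PRECONDITION & SPEC =====
-- Pre_ excludes only flag = -1, where the Python returns the string "" — not a set,
-- hence not a value of the declared return type List String.
def Pre_get_flags_from_bits_py (flag : Int) : Prop := flag ≠ -1
instance (flag : Int) : Decidable (Pre_get_flags_from_bits_py flag) := by unfold Pre_get_flags_from_bits_py; infer_instance
def pvWitness_get_flags_from_bits_py : Int := 1537

def Spec_get_flags_from_bits_py (flag : Int) (out : List String) : Prop := out = get_flags_from_bits_py_alt flag
instance (flag : Int) (out : List String) : Decidable (Spec_get_flags_from_bits_py flag out) := by unfold Spec_get_flags_from_bits_py; infer_instance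

-- ===== CLAIM (what is proved, stated in full; the proofs are below) =====
def Claim_equal_get_flags_from_bits_py : Prop := ∀ (flag : Int), Dom_get_flags_from_bits_py flag → Pre_get_flags_from_bits_py flag → Spec_get_flags_from_bits_py flag (get_flags_from_bits_py flag)

-- ===== LEMMAS AND PROOFS =====
def pvTripCls : List (String × Int × Int) := [("FF_CODE", (1536 : Int), (1536 : Int)), ("FF_DATA", (1024 : Int), (1536 : Int)), ("FF_TAIL", (512 : Int), (1536 : Int)), ("FF_UNK", (0 : Int), (1536 : Int))]
def pvTripComm : List (String × Int × Int) := [("FF_COMM", (2048 : Int), (1046528 : Int)), ("FF_REF", (4096 : Int), (1046528 : Int)), ("FF_LINE", (8192 : Int), (1046528 : Int)), ("FF_NAME", (16384 : Int), (1046528 : Int)), ("FF_LABL", (32768 : Int), (1046528 : Int)), ("FF_FLOW", (65536 : Int), (1046528 : Int)), ("FF_VAR", (524288 : Int), (1046528 : Int)), ("FF_ANYNAME", (49152 : Int), (1046528 : Int))]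
def pvTripT0 : List (String × Int × Int) := [("FF_0NUMH", (1048576 : Int), (15728640 : Int)), ("FF_0NUMD", (2097152 : Int), (15728640 : Int)), ("FF_0CHAR", (3145728 : Int), (15728640 : Int)), ("FF_0SEG", (4194304 : Int), (15728640 : Int)), ("FF_0OFF", (5242880 : Int), (15728640 : Int)), ("FF_0NUMB", (6291456 : Int), (15728640 : Int)), ("FF_0NUMO", (7340032 : Int), (15728640 : Int)), ("FF_0ENUM", (8388608 : Int), (15728640 : Int)), ("FF_0FOP", (9437184 : Int), (15728640 : Int)), ("FF_0STRO", (10485760 : Int), (15728640 : Int)), ("FF_0STK", (11534336 : Int), (15728640 : Int))]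
def pvTripT1 : List (String × Int × Int) := [("FF_1NUMH", (16777216 : Int), (251658240 : Int)), ("FF_1NUMD", (33554432 : Int), (251658240 : Int)), ("FF_1CHAR", (50331648 : Int), (251658240 : Int)), ("FF_1SEG", (67108864 : Int), (251658240 : Int)), ("FF_1OFF", (83886080 : Int), (251658240 : Int)), ("FF_1NUMB", (100663296 : Int), (251658240 : Int)), ("FF_1NUMO", (117440512 : Int), (251658240 : Int)), ("FF_1ENUM", (134217728 : Int), (251658240 : Int)), ("FF_1FOP", (150994944 : Int), (251658240 : Int)), ("FF_1STRO", (167772160 : Int), (251658240 : Int)), ("FF_1STK", (184549376 : Int), (251658240 : Int))]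
def pvTripDt : List (String × Int × Int) := [("FF_BYTE", (0 : Int), (4026531840 : Int)), ("FF_WORD", (268435456 : Int), (4026531840 : Int)), ("FF_DWRD", (536870912 : Int), (4026531840 : Int)), ("FF_QWRD", (805306368 : Int), (4026531840 : Int)), ("FF_TBYT", (1073741824 : Int), (4026531840 : Int)), ("FF_ASCI", (1342177280 : Int), (4026531840 : Int)), ("FF_STRU", (1610612736 : Int), (4026531840 : Int)), ("FF_OWRD", (1879048192 : Int), (4026531840 : Int)), ("FF_FLOAT", (2147483648 : Int), (4026531840 : Int)), ("FF_DOUBLE", (2415919104 : Int), (4026531840 : Int)), ("FF_PACKREAL", (2684354560 : Int), (4026531840 : Int)), ("FF_ALIGN", (2952790016 : Int), (4026531840 : Int))]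

-- B's scan restricted to one category's triples, with the masked field generalized to k
def pvScan (k : Int) (s : PySem.Set String) (ts : List (String × Int × Int)) : PySem.Set String :=
  List.foldl (fun acc t => if k = t.2.1 then PySem.Set.add acc t.1 else acc) s ts

lemma pvEqCls (flag : Int) (s : PySem.Set String) :
    pvAddIndexed s (PySem.Dict.get? pvDictCls (PySem.Int.band 1536 flag))
      = pvScan (PySem.Int.band flag 1536) s pvTripCls := by
  rw [PySem.Int.band_comm flag 1536]
  generalize PySem.Int.band 1536 flag = k
  by_cases h0 : k = 1536
  · subst h0; rfl
  by_cases h1 : k = 1024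
  · subst h1; rfl
  by_cases h2 : k = 512
  · subst h2; rfl
  by_cases h3 : k = 0
  · subst h3; rfl
  have hn : PySem.Dict.get? pvDictCls k = none := by
    simp [pvDictCls, PySem.Dict.get?, Ne.symm h0, Ne.symm h1, Ne.symm h2, Ne.symm h3]
  rw [hn]
  simp [pvAddIndexed, pvScan, pvTripCls, h0, h1, h2, h3]

lemma pvEqComm (flag : Int) (s : PySem.Set String) :
    pvCatStep flag s (1046528, pvDictComm) = pvScan (PySem.Int.band flag 1046528) s pvTripComm := by
  show (match PySem.Dict.get? pvDictComm (PySem.Int.band 1046528 flag) with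
        | some v => if v == "" then s else PySem.Set.add s v | none => s)
      = pvScan (PySem.Int.band flag 1046528) s pvTripComm
  rw [PySem.Int.band_comm flag 1046528]
  generalize PySem.Int.band 1046528 flag = k
  by_cases h0 : k = 2048
  · subst h0; rfl
  by_cases h1 : k = 4096
  · subst h1; rfl
  by_cases h2 : k = 8192
  · subst h2; rfl
  by_cases h3 : k = 16384
  · subst h3; rfl
  by_cases h4 : k = 32768
  · subst h4; rfl
  by_cases h5 : k = 65536
  · subst h5; rfl
  by_cases h6 : k = 524288
  · subst h6; rfl
  by_cases h7 : k = 49152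
  · subst h7; rfl
  have hn : PySem.Dict.get? pvDictComm k = none := by
    simp [pvDictComm, PySem.Dict.get?, Ne.symm h0, Ne.symm h1, Ne.symm h2, Ne.symm h3, Ne.symm h4, Ne.symm h5, Ne.symm h6, Ne.symm h7]
  rw [hn]
  simp [pvScan, pvTripComm, h0, h1, h2, h3, h4, h5, h6, h7]

lemma pvEqT0 (flag : Int) (s : PySem.Set String) :
    pvCatStep flag s (15728640, pvDictT0) = pvScan (PySem.Int.band flag 15728640) s pvTripT0 := by
  show (match PySem.Dict.get? pvDictT0 (PySem.Int.band 15728640 flag) with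
        | some v => if v == "" then s else PySem.Set.add s v | none => s)
      = pvScan (PySem.Int.band flag 15728640) s pvTripT0
  rw [PySem.Int.band_comm flag 15728640]
  generalize PySem.Int.band 15728640 flag = k
  by_cases h0 : k = 1048576
  · subst h0; rfl
  by_cases h1 : k = 2097152
  · subst h1; rfl
  by_cases h2 : k = 3145728
  · subst h2; rfl
  by_cases h3 : k = 4194304
  · subst h3; rfl
  by_cases h4 : k = 5242880
  · subst h4; rfl
  by_cases h5 : k = 6291456
  · subst h5; rfl
  by_cases h6 : k = 7340032
  · subst h6; rfl
  by_cases h7 : k = 8388608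
  · subst h7; rfl
  by_cases h8 : k = 9437184
  · subst h8; rfl
  by_cases h9 : k = 10485760
  · subst h9; rfl
  by_cases h10 : k = 11534336
  · subst h10; rfl
  have hn : PySem.Dict.get? pvDictT0 k = none := by
    simp [pvDictT0, PySem.Dict.get?, Ne.symm h0, Ne.symm h1, Ne.symm h2, Ne.symm h3, Ne.symm h4, Ne.symm h5, Ne.symm h6, Ne.symm h7, Ne.symm h8, Ne.symm h9, Ne.symm h10]
  rw [hn]
  simp [pvScan, pvTripT0, h0, h1, h2, h3, h4, h5, h6, h7, h8, h9, h10]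

lemma pvEqT1 (flag : Int) (s : PySem.Set String) :
    pvCatStep flag s (251658240, pvDictT1) = pvScan (PySem.Int.band flag 251658240) s pvTripT1 := by
  show (match PySem.Dict.get? pvDictT1 (PySem.Int.band 251658240 flag) with
        | some v => if v == "" then s else PySem.Set.add s v | none => s)
      = pvScan (PySem.Int.band flag 251658240) s pvTripT1
  rw [PySem.Int.band_comm flag 251658240]
  generalize PySem.Int.band 251658240 flag = k
  by_cases h0 : k = 16777216
  · subst h0; rfl
  by_cases h1 : k = 33554432
  · subst h1; rfl
  by_cases h2 : k = 50331648
  · subst h2; rfl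
  by_cases h3 : k = 67108864
  · subst h3; rfl
  by_cases h4 : k = 83886080
  · subst h4; rfl
  by_cases h5 : k = 100663296
  · subst h5; rfl
  by_cases h6 : k = 117440512
  · subst h6; rfl
  by_cases h7 : k = 134217728
  · subst h7; rfl
  by_cases h8 : k = 150994944
  · subst h8; rfl
  by_cases h9 : k = 167772160
  · subst h9; rfl
  by_cases h10 : k = 184549376
  · subst h10; rfl
  have hn : PySem.Dict.get? pvDictT1 k = none := by
    simp [pvDictT1, PySem.Dict.get?, Ne.symm h0, Ne.symm h1, Ne.symm h2, Ne.symm h3, Ne.symm h4, Ne.symm h5, Ne.symm h6, Ne.symm h7, Ne.symm h8, Ne.symm h9, Ne.symm h10]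
  rw [hn]
  simp [pvScan, pvTripT1, h0, h1, h2, h3, h4, h5, h6, h7, h8, h9, h10]

lemma pvEqDt (flag : Int) (s : PySem.Set String) :
    pvCatStep flag s (4026531840, pvDictDt) = pvScan (PySem.Int.band flag 4026531840) s pvTripDt := by
  show (match PySem.Dict.get? pvDictDt (PySem.Int.band 4026531840 flag) with
        | some v => if v == "" then s else PySem.Set.add s v | none => s)
      = pvScan (PySem.Int.band flag 4026531840) s pvTripDt
  rw [PySem.Int.band_comm flag 4026531840]
  generalize PySem.Int.band 4026531840 flag = k
  by_cases h0 : k = 0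
  · subst h0; rfl
  by_cases h1 : k = 268435456
  · subst h1; rfl
  by_cases h2 : k = 536870912
  · subst h2; rfl
  by_cases h3 : k = 805306368
  · subst h3; rfl
  by_cases h4 : k = 1073741824
  · subst h4; rfl
  by_cases h5 : k = 1342177280
  · subst h5; rfl
  by_cases h6 : k = 1610612736
  · subst h6; rfl
  by_cases h7 : k = 1879048192
  · subst h7; rfl
  by_cases h8 : k = 2147483648
  · subst h8; rfl
  by_cases h9 : k = 2415919104
  · subst h9; rfl
  by_cases h10 : k = 2684354560
  · subst h10; rfl
  by_cases h11 : k = 2952790016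
  · subst h11; rfl
  have hn : PySem.Dict.get? pvDictDt k = none := by
    simp [pvDictDt, PySem.Dict.get?, Ne.symm h0, Ne.symm h1, Ne.symm h2, Ne.symm h3, Ne.symm h4, Ne.symm h5, Ne.symm h6, Ne.symm h7, Ne.symm h8, Ne.symm h9, Ne.symm h10, Ne.symm h11]
  rw [hn]
  simp [pvScan, pvTripDt, h0, h1, h2, h3, h4, h5, h6, h7, h8, h9, h10, h11]

lemma pvAltEq (flag : Int) :
    get_flags_from_bits_py_alt flag
      = pvScan (PySem.Int.band flag 4026531840)
          (pvScan (PySem.Int.band flag 251658240)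
            (pvScan (PySem.Int.band flag 15728640)
              (pvScan (PySem.Int.band flag 1046528)
                (pvScan (PySem.Int.band flag 1536) PySem.Set.empty pvTripCls)
                pvTripComm)
              pvTripT0)
            pvTripT1)
          pvTripDt := rfl

-- ===== VERDICT (by name: the statement is the Claim_ definition above) =====
theorem get_flags_from_bits_py_spec : Claim_equal_get_flags_from_bits_py := by
  intro flag _ _
  unfold Spec_get_flags_from_bits_py get_flags_from_bits_py
  simp only [List.foldl_cons, List.foldl_nil]
  rw [pvEqCls, pvEqComm, pvEqT0, pvEqT1, pvEqDt, pvAltEq]
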